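-- pv_equiv track=rewrite | github.com/fossdot/fossunited-bot | scripts/02_clean_forum.py | group_by_topic
-- ===== SOURCE A (Python) =====
-- def group_by_topic(posts):
--     grouped = {}
--     for post in posts:
--         tid = post['topic_id']
--         if tid not in grouped:
--             grouped[tid] = []
--         grouped[tid].append(post)
--     # Sort each topic's posts by post_number
--     for tid in grouped:
--         grouped[tid].sort(key=lambda p: p.get('post_number', 0))
--     return grouped
-- ===== SOURCE B (Python) =====
-- def group_by_topic(posts):
--     grouped = {}
--     # register topic ids in first-appearance order, then fill from a single global stable sort
--     for post in posts:
--         grouped.setdefault(post['topic_id'], [])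
--     for post in sorted(posts, key=lambda p: p.get('post_number', 0)):
--         grouped[post['topic_id']].append(post)
--     return grouped
-- ===== Notes on version B (the rewrite author's own statement) =====
-- stated objective: alternative
-- what changed: B replaces A's group-then-sort-each-group with one global stable sort of all posts followed by a single grouping pass (keys pre-registered in first-appearance order), relying on sort stability to make each group come out sorted.
import Mathlib
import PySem

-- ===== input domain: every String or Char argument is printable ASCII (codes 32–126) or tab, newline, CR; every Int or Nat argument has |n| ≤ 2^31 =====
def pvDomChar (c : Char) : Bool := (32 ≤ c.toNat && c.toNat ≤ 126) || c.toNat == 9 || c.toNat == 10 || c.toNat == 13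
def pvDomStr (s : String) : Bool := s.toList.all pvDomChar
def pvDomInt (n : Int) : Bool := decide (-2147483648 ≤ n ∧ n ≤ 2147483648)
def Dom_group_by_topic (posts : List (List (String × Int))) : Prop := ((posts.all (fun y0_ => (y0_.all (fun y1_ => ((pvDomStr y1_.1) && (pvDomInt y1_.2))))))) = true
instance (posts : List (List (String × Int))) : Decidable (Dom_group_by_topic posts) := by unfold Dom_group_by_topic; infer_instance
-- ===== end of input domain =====

-- B replaces A's "group, then sort each group" by "sort the whole list once (stably), then group in
-- one pass"; proved to return the same association list (same key order, same per-group order).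
-- A's Python sorts the per-topic lists in place inside the dict it returns; the equivalence here is
-- about the returned value (B builds fresh lists).

-- ===== PORT A =====
-- p.get('post_number', 0)
def pnKey (p : List (String × Int)) : Int := (PySem.Dict.mk p).getD "post_number" 0

-- the grouping loop body: tid = post['topic_id']; if tid not in grouped: grouped[tid] = []; grouped[tid].append(post)
-- (the KeyError on a post without 'topic_id' is `none`; that branch returns the dict unchanged and is excluded by Pre_)
def stepA (g : PySem.Dict Int (List (List (String × Int)))) (post : List (String × Int)) :
    PySem.Dict Int (List (List (String × Int))) :=
  match (PySem.Dict.mk post).get? "topic_id" with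
  | none => g
  | some tid =>
    let g := if g.contains tid then g else g.insert tid []
    g.insert tid (g.getD tid [] ++ [post])

def group_by_topic (posts : List (List (String × Int))) : List (Int × List (List (String × Int))) :=
  let grouped := posts.foldl stepA PySem.Dict.empty
  -- for tid in grouped: grouped[tid].sort(key=...)  — sorts each stored list in place, keys unchanged
  (grouped.items.map (fun kv => (kv.1, PySem.List.sorted kv.2 pnKey false)))

-- ===== PORT B =====
-- first loop: grouped.setdefault(post['topic_id'], [])
def stepB1 (g : PySem.Dict Int (List (List (String × Int)))) (post : List (String × Int)) :
    PySem.Dict Int (List (List (String × Int))) :=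
  match (PySem.Dict.mk post).get? "topic_id" with
  | none => g
  | some tid => g.setdefault tid []

-- second loop: grouped[post['topic_id']].append(post)  (lookup raises on a missing key: `none` branch unreachable)
def stepB2 (g : PySem.Dict Int (List (List (String × Int)))) (post : List (String × Int)) :
    PySem.Dict Int (List (List (String × Int))) :=
  match (PySem.Dict.mk post).get? "topic_id" with
  | none => g
  | some tid =>
    match g.get? tid with
    | none => g
    | some l => g.insert tid (l ++ [post])

def group_by_topic_alt (posts : List (List (String × Int))) : List (Int × List (List (String × Int))) :=
  let g0 := posts.foldl stepB1 PySem.Dict.empty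
  let g := (PySem.List.sorted posts pnKey false).foldl stepB2 g0
  g.items

-- ===== PRECONDITION & SPEC =====
-- Pre_ excludes posts without a 'topic_id' key: A (and B) raise KeyError there.
def Pre_group_by_topic (posts : List (List (String × Int))) : Prop :=
  ∀ p ∈ posts, ((PySem.Dict.mk p).get? "topic_id").isSome = true
instance (posts : List (List (String × Int))) : Decidable (Pre_group_by_topic posts) := by
  unfold Pre_group_by_topic; infer_instance

def pvWitness_group_by_topic : (List (List (String × Int))) :=
  [[("topic_id", 1), ("post_number", 2)], [("topic_id", 1), ("post_number", 1)], [("topic_id", 2)]]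

def Spec_group_by_topic (posts : List (List (String × Int))) (out : List (Int × List (List (String × Int)))) : Prop := out = group_by_topic_alt posts
instance (posts : List (List (String × Int))) (out : List (Int × List (List (String × Int)))) : Decidable (Spec_group_by_topic posts out) := by unfold Spec_group_by_topic; infer_instance

-- ===== CLAIM (what is proved, stated in full; the proofs are below) =====
def Claim_equal_group_by_topic : Prop := ∀ (posts : List (List (String × Int))), Dom_group_by_topic posts → Pre_group_by_topic posts → Spec_group_by_topic posts (group_by_topic posts)

-- ===== LEMMAS AND PROOFS =====

-- the topic id of a post, as a total function (agrees with the lookup under Pre_)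
def tidF (p : List (String × Int)) : Int := ((PySem.Dict.mk p).get? "topic_id").getD 0

-- ---- stability: filtering commutes with the stable sort ----

theorem filter_insertBy_neg {α : Type} (p : α → Bool) (bf : α → α → Bool) (x : α) (ys : List α)
    (hx : p x = false) : (PySem.List.insertBy bf x ys).filter p = ys.filter p := by
  induction ys with
  | nil => simp [PySem.List.insertBy, hx]
  | cons y t ih =>
    simp only [PySem.List.insertBy]
    by_cases h : bf x y = true
    · simp [h, hx]
    · simp only [h]
      cases hp : p y <;> simp [hp, ih]

theorem insertBy_all_before {α : Type} (bf : α → α → Bool) (x : α) (l : List α)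
    (h : ∀ z ∈ l, bf x z = true) : PySem.List.insertBy bf x l = x :: l := by
  cases l with
  | nil => rfl
  | cons y t => simp [PySem.List.insertBy, h y (by simp)]

theorem filter_insertBy_pos {α : Type} (p : α → Bool) (key : α → Int) (x : α) (ys : List α)
    (hx : p x = true) (hs : ys.Pairwise (fun a b => key a ≤ key b)) :
    (PySem.List.insertBy (fun a b => decide (key a < key b)) x ys).filter p
      = PySem.List.insertBy (fun a b => decide (key a < key b)) x (ys.filter p) := by
  induction ys with
  | nil => simp [PySem.List.insertBy, hx]
  | cons y t ih =>
    rcases List.pairwise_cons.mp hs with ⟨hy, ht⟩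
    simp only [PySem.List.insertBy]
    by_cases h : decide (key x < key y) = true
    · -- x goes in front
      cases hp : p y
      · -- y filtered out: every kept element of t is still after x
        have : PySem.List.insertBy (fun a b => decide (key a < key b)) x (t.filter p)
            = x :: t.filter p := by
          refine insertBy_all_before _ _ _ (fun z hz => ?_)
          have hz' := List.mem_of_mem_filter hz
          have := hy z hz'
          simp only [decide_eq_true_eq] at h ⊢
          omega
        simp [h, hx, hp, this]
      · simp [h, hx, hp, PySem.List.insertBy]
    · simp only [h]
      cases hp : p y <;> simp [hp, ih ht, PySem.List.insertBy, h]

theorem sorted_append_singleton {α : Type} (xs : List α) (x : α) (key : α → Int) :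
    PySem.List.sorted (xs ++ [x]) key false
      = PySem.List.insertBy (fun a b => decide (key a < key b)) x (PySem.List.sorted xs key false) := by
  rw [PySem.List.sorted_eq_foldl_insertBy, PySem.List.sorted_eq_foldl_insertBy, List.foldl_append]
  rfl

theorem filter_sorted {α : Type} (p : α → Bool) (key : α → Int) (xs : List α) :
    (PySem.List.sorted xs key false).filter p = PySem.List.sorted (xs.filter p) key false := by
  induction xs using List.reverseRecOn with
  | nil => rfl
  | append_singleton xs x ih =>
    rw [sorted_append_singleton, List.filter_append]
    cases hx : p x
    · rw [filter_insertBy_neg _ _ _ _ hx, ih]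
      simp [hx]
    · rw [filter_insertBy_pos p key x _ hx (PySem.List.sorted_pairwise xs key), ih,
        ← sorted_append_singleton]
      simp [hx]

-- ---- A's side ----

theorem stepA_eq_modify (g : PySem.Dict Int (List (List (String × Int)))) (post : List (String × Int))
    (h : ((PySem.Dict.mk post).get? "topic_id").isSome = true) :
    stepA g post = g.modify (tidF post) [] (· ++ [post]) := by
  unfold stepA tidF PySem.Dict.modify
  cases hg : (PySem.Dict.mk post).get? "topic_id" with
  | none => simp [hg] at h
  | some tid =>
    simp only [Option.getD_some]
    by_cases hc : g.contains tid = true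
    · simp [hc]
    · simp only [Bool.not_eq_true] at hc
      simp [hc, PySem.Dict.getD_insert_self, PySem.Dict.insert_insert_self,
        PySem.Dict.getD_of_not_contains g _ hc]

theorem getD_foldl_modify_tid (l : List (List (String × Int))) (d : PySem.Dict Int (List (List (String × Int)))) (c : Int) :
    (l.foldl (fun g p => g.modify (tidF p) [] (· ++ [p])) d).getD c []
      = d.getD c [] ++ (l.filter (fun p => tidF p == c)) := by
  have h1 : l.foldl (fun g p => g.modify (tidF p) [] (· ++ [p])) d
      = (l.map (fun p => (tidF p, p))).foldl (fun g q => g.modify q.1 [] (· ++ [q.2])) d := by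
    rw [List.foldl_map]
  rw [h1, PySem.Dict.getD_foldl_modify_append, List.filter_map, List.map_map]
  simp [Function.comp_def]

theorem keys_foldl_modify_tid (l : List (List (String × Int))) (d : PySem.Dict Int (List (List (String × Int)))) :
    (l.foldl (fun g p => g.modify (tidF p) [] (· ++ [p])) d).keys = PySem.Set.update d.keys (l.map tidF) :=
  PySem.Dict.keys_foldl_modify_key l tidF [] (fun _ p => (· ++ [p])) d

theorem groupA_eq (posts : List (List (String × Int))) (hpre : Pre_group_by_topic posts) :
    group_by_topic posts
      = (PySem.Set.ofList (posts.map tidF)).map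
          (fun t => (t, PySem.List.sorted (posts.filter (fun p => tidF p == t)) pnKey false)) := by
  have hA : group_by_topic posts
      = List.map (fun kv => (kv.1, PySem.List.sorted kv.2 pnKey false))
          ((posts.foldl stepA PySem.Dict.empty).items) := rfl
  rw [hA]
  have hstep : posts.foldl stepA PySem.Dict.empty
      = posts.foldl (fun g p => g.modify (tidF p) [] (· ++ [p])) PySem.Dict.empty :=
    PySem.List.foldl_congr_mem posts _ _ _ (fun acc x hx => stepA_eq_modify acc x (hpre x hx))
  rw [hstep]
  have hkeys : (posts.foldl (fun g p => g.modify (tidF p) [] (· ++ [p])) PySem.Dict.empty).keys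
      = PySem.Set.ofList (posts.map tidF) := by
    rw [keys_foldl_modify_tid, PySem.Dict.keys_empty, PySem.Set.update_nil_left]
  have hnd : (posts.foldl (fun g p => g.modify (tidF p) [] (· ++ [p])) PySem.Dict.empty).keys.Nodup := by
    rw [hkeys]; exact PySem.Set.nodup_ofList _
  rw [PySem.Dict.items_eq_map_keys _ hnd [], hkeys, List.map_map]
  refine List.map_congr_left (fun t _ => ?_)
  simp only [Function.comp_def]
  rw [getD_foldl_modify_tid]
  simp [PySem.Dict.getD_empty]

-- ---- B's side ----

theorem stepB1_eq (g : PySem.Dict Int (List (List (String × Int)))) (post : List (String × Int))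
    (h : ((PySem.Dict.mk post).get? "topic_id").isSome = true) :
    stepB1 g post = g.setdefault (tidF post) [] := by
  unfold stepB1 tidF
  cases hg : (PySem.Dict.mk post).get? "topic_id" with
  | none => simp [hg] at h
  | some tid => rfl

theorem keys_foldl_setdefault (l : List (List (String × Int))) (g : PySem.Dict Int (List (List (String × Int)))) :
    (l.foldl (fun g p => g.setdefault (tidF p) []) g).keys = PySem.Set.update g.keys (l.map tidF) := by
  induction l generalizing g with
  | nil => simp [PySem.Set.update]
  | cons p t ih =>
    simp only [List.foldl_cons, List.map_cons, PySem.Set.update_cons]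
    rw [ih]
    congr 1
    rw [PySem.Dict.keys_setdefault, PySem.Set.add, PySem.Dict.contains_eq_decide_mem_keys]
    by_cases hm : tidF p ∈ g.keys
    · simp [hm, PySem.Set.contains]
    · simp [hm, PySem.Set.contains]

theorem getD_foldl_setdefault (l : List (List (String × Int))) (g : PySem.Dict Int (List (List (String × Int)))) (t : Int) :
    (l.foldl (fun g p => g.setdefault (tidF p) []) g).getD t [] = g.getD t [] := by
  induction l generalizing g with
  | nil => rfl
  | cons p r ih =>
    simp only [List.foldl_cons]
    rw [ih]
    by_cases ht : t = tidF p
    · subst ht; exact PySem.Dict.getD_setdefault_self g _ [] []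
    · rw [PySem.Dict.getD_eq_get?_getD, PySem.Dict.get?_setdefault_of_ne g [] ht,
        ← PySem.Dict.getD_eq_get?_getD]

theorem stepB2_eq_modify (g : PySem.Dict Int (List (List (String × Int)))) (post : List (String × Int))
    (h : ((PySem.Dict.mk post).get? "topic_id").isSome = true)
    (hc : g.contains (tidF post) = true) :
    stepB2 g post = g.modify (tidF post) [] (· ++ [post]) := by
  unfold stepB2 tidF PySem.Dict.modify
  cases hg : (PySem.Dict.mk post).get? "topic_id" with
  | none => simp [hg] at h
  | some tid =>
    simp only [Option.getD_some]
    unfold tidF at hc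
    rw [hg] at hc
    simp only [Option.getD_some] at hc
    rw [PySem.Dict.contains_eq_isSome_get?] at hc
    cases hgt : g.get? tid with
    | none => rw [hgt] at hc; simp at hc
    | some l => simp [PySem.Dict.getD_of_get?_eq_some g [] hgt]

theorem contains_modify_of_contains (g : PySem.Dict Int (List (List (String × Int)))) (k c : Int)
    (f : List (List (String × Int)) → List (List (String × Int)))
    (hc : g.contains c = true) : (g.modify k [] f).contains c = true := by
  rw [PySem.Dict.contains_modify]; simp [hc]

theorem foldl_stepB2_eq_modify (l : List (List (String × Int))) (g : PySem.Dict Int (List (List (String × Int))))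
    (hpre : ∀ p ∈ l, ((PySem.Dict.mk p).get? "topic_id").isSome = true)
    (hc : ∀ p ∈ l, g.contains (tidF p) = true) :
    l.foldl stepB2 g = l.foldl (fun g p => g.modify (tidF p) [] (· ++ [p])) g := by
  induction l generalizing g with
  | nil => rfl
  | cons p t ih =>
    simp only [List.foldl_cons]
    rw [stepB2_eq_modify g p (hpre p (by simp)) (hc p (by simp))]
    exact ih _ (fun q hq => hpre q (by simp [hq]))
      (fun q hq => contains_modify_of_contains _ _ _ _ (hc q (by simp [hq])))

theorem groupB_eq (posts : List (List (String × Int))) (hpre : Pre_group_by_topic posts) :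
    group_by_topic_alt posts
      = (PySem.Set.ofList (posts.map tidF)).map
          (fun t => (t, (PySem.List.sorted posts pnKey false).filter (fun p => tidF p == t))) := by
  have hB : group_by_topic_alt posts
      = ((PySem.List.sorted posts pnKey false).foldl stepB2 (posts.foldl stepB1 PySem.Dict.empty)).items := rfl
  rw [hB]
  have h1 : posts.foldl stepB1 PySem.Dict.empty
      = posts.foldl (fun g p => g.setdefault (tidF p) []) PySem.Dict.empty :=
    PySem.List.foldl_congr_mem posts _ _ _ (fun acc x hx => stepB1_eq acc x (hpre x hx))
  rw [h1]
  set g0 := posts.foldl (fun g p => g.setdefault (tidF p) []) PySem.Dict.empty with hg0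
  have hk0 : g0.keys = PySem.Set.ofList (posts.map tidF) := by
    rw [hg0, keys_foldl_setdefault, PySem.Dict.keys_empty, PySem.Set.update_nil_left]
  have hpre' : ∀ p ∈ PySem.List.sorted posts pnKey false,
      ((PySem.Dict.mk p).get? "topic_id").isSome = true := by
    intro p hp; exact hpre p ((PySem.List.mem_sorted posts pnKey false p).mp hp)
  have hc0 : ∀ p ∈ PySem.List.sorted posts pnKey false, g0.contains (tidF p) = true := by
    intro p hp
    rw [PySem.Dict.contains_eq_decide_mem_keys, hk0, decide_eq_true_eq, PySem.Set.mem_ofList]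
    exact List.mem_map_of_mem ((PySem.List.mem_sorted posts pnKey false p).mp hp)
  rw [foldl_stepB2_eq_modify _ _ hpre' hc0]
  have hkeys : (List.foldl (fun g p => g.modify (tidF p) [] (· ++ [p])) g0
      (PySem.List.sorted posts pnKey false)).keys = PySem.Set.ofList (posts.map tidF) := by
    rw [keys_foldl_modify_tid, hk0, PySem.Set.update_eq_append_filter]
    rw [List.filter_eq_nil_iff.mpr ?_, List.append_nil]
    intro a ha
    rw [PySem.Set.mem_ofList] at ha
    rcases List.mem_map.mp ha with ⟨p, hp, rfl⟩
    have hpp := (PySem.List.mem_sorted posts pnKey false p).mp hp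
    simp [PySem.Set.contains, PySem.Set.mem_ofList]
    exact ⟨p, hpp, rfl⟩
  have hnd : (List.foldl (fun g p => g.modify (tidF p) [] (· ++ [p])) g0
      (PySem.List.sorted posts pnKey false)).keys.Nodup := by
    rw [hkeys]; exact PySem.Set.nodup_ofList _
  rw [PySem.Dict.items_eq_map_keys _ hnd [], hkeys]
  refine List.map_congr_left (fun t _ => ?_)
  rw [getD_foldl_modify_tid, hg0, getD_foldl_setdefault]
  simp [PySem.Dict.getD_empty]

-- ===== VERDICT (by name: the statement is the Claim_ definition above) =====
theorem group_by_topic_spec : Claim_equal_group_by_topic := by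
  intro posts _ hpre
  unfold Spec_group_by_topic
  rw [groupA_eq posts hpre, groupB_eq posts hpre]
  refine List.map_congr_left (fun t _ => ?_)
  rw [filter_sorted]
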